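-- pv_equiv track=rewrite | github.com/Marlon-Lazo-Coronado/Ing_comunicaciones_segundaparte_proyec | proyecto02_comu.py | extrac_bits
-- ===== SOURCE A (Python) =====
-- def extrac_bits(bits_a_enviar1):
--     cont = 0
--     m_get = ''
--     for bit in bits_a_enviar1:
--         if cont < 6:
--             m_get = m_get + bit
--             cont = cont + 1
--         else:
--             if cont < 11:
--                 m_get = m_get
--                 cont = cont + 1
--             else:
--                 cont = 0
--     return m_get
-- ===== SOURCE B (Python) =====
-- def extrac_bits(bits_a_enviar1):
--     pieces = []
--     for i in range(0, len(bits_a_enviar1), 12):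
--         pieces.append(bits_a_enviar1[i:i+6])
--     return ''.join(pieces)
-- ===== Notes on version B (the rewrite author's own statement) =====
-- stated objective: simpler
-- what changed: Replaces the per-character mod-12 counter with branch logic by direct block slicing: iterate over chunk starts range(0, len, 12), keep the first 6 characters of each 12-wide chunk, and join the pieces (bulk slicing/join instead of per-character string concatenation).
import Mathlib
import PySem

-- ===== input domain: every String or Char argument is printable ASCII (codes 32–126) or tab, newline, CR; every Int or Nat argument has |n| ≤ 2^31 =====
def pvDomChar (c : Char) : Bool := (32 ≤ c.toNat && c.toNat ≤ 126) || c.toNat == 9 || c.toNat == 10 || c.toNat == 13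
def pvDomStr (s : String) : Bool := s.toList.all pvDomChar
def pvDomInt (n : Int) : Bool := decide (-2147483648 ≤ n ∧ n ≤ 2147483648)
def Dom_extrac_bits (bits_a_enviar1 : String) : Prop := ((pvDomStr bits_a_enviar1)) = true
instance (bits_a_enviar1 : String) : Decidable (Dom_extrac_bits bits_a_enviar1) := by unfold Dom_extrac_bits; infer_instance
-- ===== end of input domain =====

-- B replaces A's per-character mod-12 counter with block slicing (first 6 chars of each
-- 12-wide chunk); same O(n) cost, simpler decomposition.

-- ===== PORT A =====
-- literal transliteration of A: fold over the characters with state (cont, m_get)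
def extrac_bits (bits_a_enviar1 : String) : String :=
  String.ofList
    ((bits_a_enviar1.toList.foldl
        (fun st bit =>
          if st.1 < 6 then (st.1 + 1, st.2 ++ [bit])
          else if st.1 < 11 then (st.1 + 1, st.2)
          else ((0 : Int), st.2))
        ((0 : Int), ([] : List Char))).2)

-- ===== PORT B =====
-- literal transliteration of Source B: for i in range(0, len(s), 12): pieces.append(s[i:i+6]); ''.join
def extrac_bits_alt (bits_a_enviar1 : String) : String :=
  String.ofList
    (((PySem.List.pyRange 0 (PySem.Str.len bits_a_enviar1) 12).foldl
        (fun pieces i =>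
          pieces ++ [PySem.List.slice bits_a_enviar1.toList (some i) (some (i + 6))])
        ([] : List (List Char))).flatten)

-- ===== PRECONDITION & SPEC =====
def Spec_extrac_bits (bits_a_enviar1 : String) (out : String) : Prop := out = extrac_bits_alt bits_a_enviar1
instance (bits_a_enviar1 : String) (out : String) : Decidable (Spec_extrac_bits bits_a_enviar1 out) := by unfold Spec_extrac_bits; infer_instance

-- ===== CLAIM (what is proved, stated in full; the proofs are below) =====
def Claim_equal_extrac_bits : Prop := ∀ (bits_a_enviar1 : String), Dom_extrac_bits bits_a_enviar1 → Spec_extrac_bits bits_a_enviar1 (extrac_bits bits_a_enviar1)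

-- ===== LEMMAS AND PROOFS =====

-- what A's counter loop keeps, as a structural function of (cont, remaining chars)
def keepA (c : Int) (l : List Char) : List Char :=
  match l with
  | [] => []
  | b :: r => if c < 6 then b :: keepA (c + 1) r
              else if c < 11 then keepA (c + 1) r
              else keepA 0 r

theorem foldA_eq (l : List Char) : ∀ (c : Int) (acc : List Char),
    (l.foldl
        (fun st bit =>
          if st.1 < 6 then (st.1 + 1, st.2 ++ [bit])
          else if st.1 < 11 then (st.1 + 1, st.2)
          else ((0 : Int), st.2))
        (c, acc)).2 = acc ++ keepA c l := by
  induction l with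
  | nil => intro c acc; simp [keepA]
  | cons b r ih =>
    intro c acc
    simp only [List.foldl_cons, keepA]
    split_ifs <;> simp [ih]

theorem keepA_zero (l : List Char) : keepA 0 l = l.take 6 ++ keepA 6 (l.drop 6) := by
  rcases l with _ | ⟨a, l⟩; · norm_num [keepA]
  rcases l with _ | ⟨b, l⟩; · norm_num [keepA]
  rcases l with _ | ⟨c, l⟩; · norm_num [keepA]
  rcases l with _ | ⟨d, l⟩; · norm_num [keepA]
  rcases l with _ | ⟨e, l⟩; · norm_num [keepA]
  rcases l with _ | ⟨f, l⟩; · norm_num [keepA]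
  norm_num [keepA]

theorem keepA_six (l : List Char) : keepA 6 l = keepA 0 (l.drop 6) := by
  rcases l with _ | ⟨a, l⟩; · norm_num [keepA]
  rcases l with _ | ⟨b, l⟩; · norm_num [keepA]
  rcases l with _ | ⟨c, l⟩; · norm_num [keepA]
  rcases l with _ | ⟨d, l⟩; · norm_num [keepA]
  rcases l with _ | ⟨e, l⟩; · norm_num [keepA]
  rcases l with _ | ⟨f, l⟩; · norm_num [keepA]
  norm_num [keepA]

theorem keepA_chunk (l : List Char) : keepA 0 l = l.take 6 ++ keepA 0 (l.drop 12) := by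
  rw [keepA_zero, keepA_six, List.drop_drop]

theorem pyRange_pos_nil (a b s : Int) (hs : 0 < s) (h : b ≤ a) :
    PySem.List.pyRange a b s = [] := by
  rw [PySem.List.pyRange_of_pos a b hs]
  simp [show ¬ a < b by omega]

theorem pyRange_pos_cons (a b s : Int) (hs : 0 < s) (h : a < b) :
    PySem.List.pyRange a b s = a :: PySem.List.pyRange (a + s) b s := by
  rw [PySem.List.pyRange_of_pos a b hs, PySem.List.pyRange_of_pos (a + s) b hs]
  have h1 : (b - a + s - 1) / s = (b - (a + s) + s - 1) / s + 1 := by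
    have := Int.add_mul_ediv_right (b - (a + s) + s - 1) 1 (by omega : s ≠ 0)
    rw [show b - a + s - 1 = b - (a + s) + s - 1 + 1 * s by ring]
    omega
  have h2 : 0 ≤ (b - (a + s) + s - 1) / s := by
    apply Int.ediv_nonneg <;> omega
  by_cases hab : a + s < b
  · simp only [if_pos h, if_pos hab, h1]
    rw [show ((b - (a + s) + s - 1) / s + 1).toNat = ((b - (a + s) + s - 1) / s).toNat + 1 by omega]
    rw [List.range_succ_eq_map]
    simp [List.map_map, Function.comp]
    intro k _; ring
  · have hc : (b - a + s - 1) / s = 1 := by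
      rw [h1]
      have : (b - (a + s) + s - 1) / s = 0 := by
        apply Int.ediv_eq_zero_of_lt <;> omega
      omega
    simp [if_pos h, if_neg hab, hc]

theorem pyRange_pos_shift (a b s t : Int) (hs : 0 < s) :
    PySem.List.pyRange (a + t) (b + t) s = (PySem.List.pyRange a b s).map (· + t) := by
  rw [PySem.List.pyRange_of_pos a b hs, PySem.List.pyRange_of_pos (a + t) (b + t) hs]
  have hc : (if a + t < b + t then ((b + t - (a + t) + s - 1) / s).toNat else 0)
      = (if a < b then ((b - a + s - 1) / s).toNat else 0) := by
    rcases lt_or_ge a b with h | h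
    · simp [h, show a + t < b + t by omega, show b + t - (a + t) = b - a by ring]
    · simp [show ¬ a < b by omega, show ¬ a + t < b + t by omega]
  rw [hc, List.map_map]
  apply List.map_congr_left
  intro k _; simp [Function.comp]; ring

-- B's pieces, in closed map form
def piecesB (l : List Char) : List Char :=
  (((PySem.List.pyRange 0 (l.length : Int) 12).map
      (fun i => PySem.List.slice l (some i) (some (i + 6)))).flatten)

theorem piecesB_eq_keepA (l : List Char) : piecesB l = keepA 0 l := by
  by_cases hnil : l = []
  · subst hnil
    simp [piecesB, keepA, pyRange_pos_nil 0 0 12 (by norm_num) (by norm_num)]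
  · have hpos : 0 < l.length := List.length_pos_of_ne_nil hnil
    have ih := piecesB_eq_keepA (l.drop 12)
    rw [piecesB, pyRange_pos_cons 0 (l.length : Int) 12 (by norm_num) (by exact_mod_cast hpos)]
    simp only [List.map_cons, List.flatten_cons, zero_add]
    have hp0 : PySem.List.slice l (some 0) (some 6) = l.take 6 := by
      rw [show (6 : Int) = ((6 : Nat) : Int) by norm_num]
      rw [PySem.List.slice_zero_start, PySem.List.slice_to_natCast]
    have htail :
        ((PySem.List.pyRange 12 (l.length : Int) 12).map
            (fun i => PySem.List.slice l (some i) (some (i + 6)))).flatten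
          = piecesB (l.drop 12) := by
      have hshift : PySem.List.pyRange 12 (l.length : Int) 12
          = (PySem.List.pyRange 0 ((l.length : Int) - 12) 12).map (· + 12) := by
        have h := pyRange_pos_shift 0 ((l.length : Int) - 12) 12 12 (by norm_num)
        rw [show (0 : Int) + 12 = 12 by ring, show (l.length : Int) - 12 + 12 = (l.length : Int) by ring] at h
        exact h
      rw [hshift, piecesB]
      have hrange : PySem.List.pyRange 0 (((l.drop 12).length : Nat) : Int) 12
          = PySem.List.pyRange 0 ((l.length : Int) - 12) 12 := by
        by_cases h12 : 12 ≤ l.length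
        · congr 1
          simp [List.length_drop]
          omega
        · rw [pyRange_pos_nil _ _ _ (by norm_num) (by simp [List.length_drop]; omega),
              pyRange_pos_nil _ _ _ (by norm_num) (by omega)]
      rw [hrange, List.map_map]
      congr 1
      apply List.map_congr_left
      intro i hi
      have h0i : 0 ≤ i := by
        rcases (PySem.List.mem_pyRange_iff_of_pos (by norm_num : (0:Int) < 12) i).mp hi with ⟨h, _⟩
        exact h
      simp only [Function.comp]
      rw [PySem.List.slice_toNat _ (by omega : (0:Int) ≤ i + 12) (by omega : (0:Int) ≤ i + 12 + 6),
          PySem.List.slice_toNat _ h0i (by omega : (0:Int) ≤ i + 6)]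
      rw [show (i + 12).toNat = i.toNat + 12 by omega,
          show (i + 12 + 6).toNat - (i.toNat + 12) = 6 by omega,
          show (i + 6).toNat - i.toNat = 6 by omega,
          List.drop_drop, Nat.add_comm 12 i.toNat]
    rw [hp0, htail, ih, ← keepA_chunk]
termination_by l.length
decreasing_by simp; omega

-- ===== VERDICT (by name: the statement is the Claim_ definition above) =====
theorem extrac_bits_spec : Claim_equal_extrac_bits := by
  intro s _
  show extrac_bits s = extrac_bits_alt s
  rw [extrac_bits, extrac_bits_alt]
  congr 1
  rw [foldA_eq, List.nil_append,
      PySem.List.foldl_append_singleton_eq_map, List.nil_append]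
  rw [show PySem.Str.len s = (s.toList.length : Int) from PySem.Str.len_eq s]
  exact (piecesB_eq_keepA s.toList).symm
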